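-- pv_equiv track=rewrite | github.com/zaritskylab/recurring-transient-communities | data_layer/arcos/hotspots_mapper.py | _rec_perm
-- ===== SOURCE A (Python) =====
-- import copy
--
-- def _rec_perm(l_of_l, n, current_perm=[]):
--     if len(l_of_l) == 0:
--         return [current_perm]
--
--     else:
--         l_of_l_copy = copy.deepcopy(l_of_l)
--         curr_list = l_of_l_copy.pop(0)
--         perms = []
--
--         for i in curr_list:
--             if i not in current_perm:
--                 tmp_perms = _rec_perm(l_of_l_copy, n, current_perm + [i])
--                 if len(tmp_perms) > 0:
--                     perms.extend(tmp_perms)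
--                     n -= len(tmp_perms)
--                 if n <= 0:
--                     return perms
--         return perms
-- ===== SOURCE B (Python) =====
-- def _rec_perm(l_of_l, n, current_perm=[]):
--     # Backtracking DFS with a shared used-set and in-place partial permutation:
--     # no deepcopy, set membership tests, stops as soon as the cap is reached.
--     cap = n if n > 0 else 0
--     out = []
--     used = set(current_perm)
--     perm = list(current_perm)
--
--     def dfs(rows):
--         if not rows:
--             out.append(list(perm))
--             return len(out) >= cap
--         first, rest = rows[0], rows[1:]
--         for i in first:
--             if i not in used:
--                 used.add(i)
--                 perm.append(i)
--                 done = dfs(rest)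
--                 perm.pop()
--                 used.discard(i)
--                 if done:
--                     return True
--         return False
--
--     if cap > 0:
--         dfs(l_of_l)
--     return out
-- ===== Notes on version B (the rewrite author's own statement) =====
-- stated objective: alternative
-- what changed: Replaces A's deepcopy of the whole remaining list-of-lists at every recursion node and list-membership scans by backtracking DFS over the untouched input with one shared used-set and an in-place partial permutation, stopping as soon as n results are collected.
-- intended difference: When n <= 0 and a greedy first-admissible path through l_of_l exists, A ignores the already-exhausted cap and returns that single greedy permutation (e.g. _rec_perm([[1]], 0) == [[1]]), while B returns [], the intended answer when zero permutations are requested. — e.g. on _rec_perm([[1]], 0, []): A returns [[1]], B returns []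
import Mathlib
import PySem

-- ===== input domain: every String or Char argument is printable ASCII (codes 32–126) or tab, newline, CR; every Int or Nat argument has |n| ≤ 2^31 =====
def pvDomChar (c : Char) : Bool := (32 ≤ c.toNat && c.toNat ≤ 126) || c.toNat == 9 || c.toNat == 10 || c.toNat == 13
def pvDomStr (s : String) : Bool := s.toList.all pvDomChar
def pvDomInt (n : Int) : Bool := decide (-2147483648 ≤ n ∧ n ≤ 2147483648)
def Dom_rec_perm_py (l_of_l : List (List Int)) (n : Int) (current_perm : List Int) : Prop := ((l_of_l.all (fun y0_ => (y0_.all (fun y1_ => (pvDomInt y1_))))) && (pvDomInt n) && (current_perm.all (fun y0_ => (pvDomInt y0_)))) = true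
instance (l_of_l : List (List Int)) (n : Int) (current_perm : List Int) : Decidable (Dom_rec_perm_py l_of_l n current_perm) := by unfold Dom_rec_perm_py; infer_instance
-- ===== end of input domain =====

-- B replaces A's deepcopy-per-node recursion by backtracking over the untouched input with a
-- shared used-set and in-place partial permutation (objective: alternative algorithm).

-- ===== PORT A =====
-- the for-loop of A's body; `f` is the recursive call on the remaining lists (rest of l_of_l)
def recALoop (f : Int → List Int → List (List Int)) (curr : List Int) (n : Int)
    (current_perm : List Int) (perms : List (List Int)) : List (List Int) :=
  match curr with
  | [] => perms
  | i :: is =>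
    if i ∈ current_perm then recALoop f is n current_perm perms
    else
      let tmp := f n (current_perm ++ [i])
      let perms' := if 0 < tmp.length then perms ++ tmp else perms
      let n' := if 0 < tmp.length then n - tmp.length else n
      if n' ≤ 0 then perms' else recALoop f is n' current_perm perms'

def rec_perm_py (l_of_l : List (List Int)) (n : Int) (current_perm : List Int) : List (List Int) :=
  match l_of_l with
  | [] => [current_perm]
  | curr :: rest => recALoop (fun m cp => rec_perm_py rest m cp) curr n current_perm []

-- ===== PORT B =====
-- the for-loop of B's dfs; `f` is dfs on the remaining rows
def dfsLoop (f : PySem.Set Int → List Int → List (List Int) → List (List Int) × Bool)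
    (row : List Int) (used : PySem.Set Int) (perm : List Int) (out : List (List Int)) :
    List (List Int) × Bool :=
  match row with
  | [] => (out, false)
  | i :: is =>
    if PySem.Set.contains used i then dfsLoop f is used perm out
    else
      let r := f (PySem.Set.add used i) (perm ++ [i]) out
      if r.2 then (r.1, true) else dfsLoop f is used perm r.1

def dfsB (cap : Int) (rows : List (List Int)) (used : PySem.Set Int) (perm : List Int)
    (out : List (List Int)) : List (List Int) × Bool :=
  match rows with
  | [] => (out ++ [perm], decide (cap ≤ (out.length : Int) + 1))
  | first :: rest => dfsLoop (fun u p o => dfsB cap rest u p o) first used perm out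

def rec_perm_py_alt (l_of_l : List (List Int)) (n : Int) (current_perm : List Int) : List (List Int) :=
  let cap : Int := if 0 < n then n else 0
  if 0 < cap then (dfsB cap l_of_l (PySem.Set.ofList current_perm) current_perm []).1 else []

-- ===== PRECONDITION & SPEC =====
-- the greedy "first admissible element at each level" path; used only to state D_
def pvGreedy : List (List Int) → List Int → Option (List Int)
  | [], cp => some cp
  | c :: r, cp =>
    match c.find? (fun i => !decide (i ∈ cp)) with
    | some i => pvGreedy r (cp ++ [i])
    | none => none

-- When n ≤ 0 (a nonpositive cap) and a greedy first-admissible path through l_of_l exists, A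
-- ignores the exhausted cap and returns that single greedy permutation, while B returns the
-- intended empty list (zero permutations were requested).
def D_rec_perm_py (l_of_l : List (List Int)) (n : Int) (current_perm : List Int) : Prop :=
  n ≤ 0 ∧ (pvGreedy l_of_l current_perm).isSome = true
instance (l_of_l : List (List Int)) (n : Int) (current_perm : List Int) : Decidable (D_rec_perm_py l_of_l n current_perm) := by unfold D_rec_perm_py; infer_instance

def Spec_rec_perm_py (l_of_l : List (List Int)) (n : Int) (current_perm : List Int) (out : List (List Int)) : Prop := ¬ D_rec_perm_py l_of_l n current_perm → out = rec_perm_py_alt l_of_l n current_perm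
instance (l_of_l : List (List Int)) (n : Int) (current_perm : List Int) (out : List (List Int)) : Decidable (Spec_rec_perm_py l_of_l n current_perm out) := by unfold Spec_rec_perm_py; infer_instance

def pvDiffWitness_rec_perm_py : List (List Int) × Int × List Int := ([[1]], 0, [])
def pvDiffWitnessOut_rec_perm_py : (List (List Int)) × (List (List Int)) := ([[1]], [])

-- ===== CLAIM (what is proved, stated in full; the proofs are below) =====
def Claim_unchanged_rec_perm_py : Prop := ∀ (l_of_l : List (List Int)) (n : Int) (current_perm : List Int), Dom_rec_perm_py l_of_l n current_perm → Spec_rec_perm_py l_of_l n current_perm (rec_perm_py l_of_l n current_perm)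
def Claim_changed_rec_perm_py : Prop := Dom_rec_perm_py (pvDiffWitness_rec_perm_py.1) (pvDiffWitness_rec_perm_py.2.1) (pvDiffWitness_rec_perm_py.2.2) ∧ D_rec_perm_py (pvDiffWitness_rec_perm_py.1) (pvDiffWitness_rec_perm_py.2.1) (pvDiffWitness_rec_perm_py.2.2) ∧ rec_perm_py (pvDiffWitness_rec_perm_py.1) (pvDiffWitness_rec_perm_py.2.1) (pvDiffWitness_rec_perm_py.2.2) = pvDiffWitnessOut_rec_perm_py.1 ∧ rec_perm_py_alt (pvDiffWitness_rec_perm_py.1) (pvDiffWitness_rec_perm_py.2.1) (pvDiffWitness_rec_perm_py.2.2) = pvDiffWitnessOut_rec_perm_py.2 ∧ pvDiffWitnessOut_rec_perm_py.1 ≠ pvDiffWitnessOut_rec_perm_py.2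
def Claim_exact_rec_perm_py : Prop := ∀ (l_of_l : List (List Int)) (n : Int) (current_perm : List Int), Dom_rec_perm_py l_of_l n current_perm → D_rec_perm_py l_of_l n current_perm → rec_perm_py l_of_l n current_perm ≠ rec_perm_py_alt l_of_l n current_perm

-- ===== LEMMAS AND PROOFS =====

-- the DFS leaf stream: all permutations picking one not-yet-used element from each list, in order
def pvLeaves : List (List Int) → List Int → List (List Int)
  | [], cp => [cp]
  | c :: r, cp => c.flatMap (fun i => if i ∈ cp then [] else pvLeaves r (cp ++ [i]))

-- A with budget n ≥ 1 collects the first n leaves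
theorem recALoop_pos (f : Int → List Int → List (List Int)) (g : List Int → List (List Int))
    (cp : List Int)
    (hf : ∀ m cp', 1 ≤ m → f m cp' = (g cp').take m.toNat) :
    ∀ (curr : List Int) (n : Int) (perms : List (List Int)), 1 ≤ n →
      recALoop f curr n cp perms =
        perms ++ (curr.flatMap (fun i => if i ∈ cp then [] else g (cp ++ [i]))).take n.toNat := by
  intro curr
  induction curr with
  | nil => intro n perms _; simp [recALoop]
  | cons i is ih =>
    intro n perms hn
    by_cases hi : i ∈ cp
    · simpa [recALoop, hi] using ih n perms hn
    · rw [recALoop]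
      rw [if_neg hi, hf n _ hn]
      have hflat : (i :: is).flatMap (fun j => if j ∈ cp then [] else g (cp ++ [j]))
          = g (cp ++ [i]) ++ is.flatMap (fun j => if j ∈ cp then [] else g (cp ++ [j])) := by
        simp [hi]
      rw [hflat]
      have hmin : ((g (cp ++ [i])).take n.toNat).length = min n.toNat (g (cp ++ [i])).length :=
        List.length_take
      by_cases h0 : 0 < ((g (cp ++ [i])).take n.toNat).length
      · simp only [h0, if_true]
        by_cases hstop : n - (((g (cp ++ [i])).take n.toNat).length : Int) ≤ 0
        · rw [if_pos hstop]
          have hle : n.toNat ≤ (g (cp ++ [i])).length := by omega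
          rw [List.take_append_of_le_length hle]
        · rw [if_neg hstop]
          have hfull : (g (cp ++ [i])).take n.toNat = g (cp ++ [i]) :=
            List.take_of_length_le (by omega)
          rw [hfull] at hstop ⊢
          rw [ih (n - ((g (cp ++ [i])).length : Int)) _ (by omega)]
          rw [List.take_append, hfull]
          have harith : (n - ((g (cp ++ [i])).length : Int)).toNat
              = n.toNat - (g (cp ++ [i])).length := by omega
          rw [harith, List.append_assoc]
      · simp only [h0, if_false]
        rw [if_neg (by omega : ¬ n ≤ 0)]
        have hnil : g (cp ++ [i]) = [] := by
          have : (g (cp ++ [i])).length = 0 := by omega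
          simpa using this
        rw [ih n perms hn, hnil]
        simp

theorem recA_pos : ∀ (l : List (List Int)) (n : Int) (cp : List Int), 1 ≤ n →
    rec_perm_py l n cp = (pvLeaves l cp).take n.toNat := by
  intro l
  induction l with
  | nil =>
    intro n cp hn
    rw [rec_perm_py, pvLeaves, List.take_of_length_le (by simp; omega)]
  | cons c r ih =>
    intro n cp hn
    rw [rec_perm_py, pvLeaves]
    simpa using recALoop_pos _ (pvLeaves r) cp (fun m cp' hm => ih m cp' hm) c n [] hn

-- A with budget n ≤ 0 follows the first admissible branch only
theorem recALoop_neg (f : Int → List Int → List (List Int)) (cp : List Int) :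
    ∀ (curr : List Int) (n : Int) (perms : List (List Int)), n ≤ 0 →
      recALoop f curr n cp perms =
        perms ++ (match curr.find? (fun i => !decide (i ∈ cp)) with
                  | some i => f n (cp ++ [i])
                  | none => []) := by
  intro curr
  induction curr with
  | nil => intro n perms _; simp [recALoop]
  | cons i is ih =>
    intro n perms hn
    by_cases hi : i ∈ cp
    · rw [recALoop]
      rw [if_pos hi, ih n perms hn]
      simp [List.find?, hi]
    · rw [recALoop]
      simp only [if_neg hi]
      have hfind : (i :: is).find? (fun i => !decide (i ∈ cp)) = some i := by
        simp [List.find?, hi]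
      rw [hfind]
      by_cases h0 : 0 < (f n (cp ++ [i])).length
      · simp only [h0, if_true]
        have : n - (f n (cp ++ [i])).length ≤ 0 := by omega
        rw [if_pos this]
      · simp only [h0, if_false]
        rw [if_pos hn]
        simp at h0
        simp [h0]

theorem recA_neg : ∀ (l : List (List Int)) (n : Int) (cp : List Int), n ≤ 0 →
    rec_perm_py l n cp = (match pvGreedy l cp with | some p => [p] | none => []) := by
  intro l
  induction l with
  | nil => intro n cp _; simp [rec_perm_py, pvGreedy]
  | cons c r ih =>
    intro n cp hn
    rw [rec_perm_py, recALoop_neg _ cp c n [] hn, pvGreedy]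
    cases c.find? (fun i => !decide (i ∈ cp)) with
    | none => simp
    | some i => simpa using ih n (cp ++ [i]) hn

-- B collects the first (cap - |out|) leaves and reports whether the cap was reached
theorem dfsLoop_eq (cap : Int) (f : PySem.Set Int → List Int → List (List Int) → List (List Int) × Bool)
    (g : List Int → List (List Int)) (perm : List Int) (used : PySem.Set Int)
    (hf : ∀ (u : PySem.Set Int) (p : List Int) (o : List (List Int)),
        (∀ j : Int, j ∈ u ↔ j ∈ p) → (o.length : Int) < cap →
        f u p o = (o ++ (g p).take (cap - o.length).toNat,
                   decide ((cap - o.length).toNat ≤ (g p).length)))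
    (hinv : ∀ j : Int, j ∈ used ↔ j ∈ perm) :
    ∀ (row : List Int) (out : List (List Int)), (out.length : Int) < cap →
      dfsLoop f row used perm out =
        (out ++ ((row.flatMap (fun i => if i ∈ perm then [] else g (perm ++ [i]))).take (cap - out.length).toNat),
         decide ((cap - out.length).toNat ≤ (row.flatMap (fun i => if i ∈ perm then [] else g (perm ++ [i]))).length)) := by
  intro row
  induction row with
  | nil =>
    intro out hout
    rw [dfsLoop]
    simp
    omega
  | cons i is ih =>
    intro out hout
    rw [dfsLoop]
    rw [PySem.Set.contains_eq_decide]
    simp only [decide_eq_true_eq]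
    by_cases hi : i ∈ perm
    · rw [if_pos ((hinv i).mpr hi)]
      rw [ih out hout]
      simp [hi]
    · rw [if_neg (fun h => hi ((hinv i).mp h))]
      have hinv' : ∀ j : Int, j ∈ PySem.Set.add used i ↔ j ∈ perm ++ [i] := by
        intro j; rw [PySem.Set.mem_add]; simp [hinv j]
      rw [hf _ _ _ hinv' hout]
      have hflat : (i :: is).flatMap (fun j => if j ∈ perm then [] else g (perm ++ [j]))
          = g (perm ++ [i]) ++ is.flatMap (fun j => if j ∈ perm then [] else g (perm ++ [j])) := by
        simp [hi]
      rw [hflat]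
      by_cases hdone : (cap - (out.length : Int)).toNat ≤ (g (perm ++ [i])).length
      · simp only [hdone, decide_true, if_true]
        simp only [Prod.mk.injEq]
        refine ⟨by rw [List.take_append_of_le_length hdone], ?_⟩
        symm
        refine decide_eq_true ?_
        simp only [List.length_append]
        omega
      · simp only [hdone, decide_false]
        have hfull : (g (perm ++ [i])).take (cap - (out.length : Int)).toNat = g (perm ++ [i]) :=
          List.take_of_length_le (by omega)
        rw [hfull]
        rw [ih (out ++ g (perm ++ [i])) (by simp only [List.length_append]; push_cast; omega)]
        rw [List.take_append]
        have harith : (cap - ((out ++ g (perm ++ [i])).length : Int)).toNat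
            = (cap - (out.length : Int)).toNat - (g (perm ++ [i])).length := by
          simp only [List.length_append]; push_cast; omega
        rw [harith, if_neg (by simp : ¬ (false = true)), hfull]
        simp only [Prod.mk.injEq]
        refine ⟨by rw [List.append_assoc], ?_⟩
        refine decide_eq_decide.mpr ?_
        simp only [List.length_append]
        omega

theorem dfsB_eq (cap : Int) :
    ∀ (rows : List (List Int)) (used : PySem.Set Int) (perm : List Int) (out : List (List Int)),
      (∀ j : Int, j ∈ used ↔ j ∈ perm) → (out.length : Int) < cap →
      dfsB cap rows used perm out =
        (out ++ (pvLeaves rows perm).take (cap - out.length).toNat,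
         decide ((cap - out.length).toNat ≤ (pvLeaves rows perm).length)) := by
  intro rows
  induction rows with
  | nil =>
    intro used perm out _ hout
    rw [dfsB, pvLeaves]
    have h1 : (1 : Nat) ≤ (cap - out.length).toNat := by omega
    rw [List.take_of_length_le (by simpa using h1)]
    congr 1
    simp
    omega
  | cons c r ih =>
    intro used perm out hinv hout
    rw [dfsB, pvLeaves]
    exact dfsLoop_eq cap _ (pvLeaves r) perm used (fun u p o hu ho => ih u p o hu ho) hinv c out hout

theorem alt_pos (l : List (List Int)) (n : Int) (cp : List Int) (hn : 1 ≤ n) :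
    rec_perm_py_alt l n cp = (pvLeaves l cp).take n.toNat := by
  rw [rec_perm_py_alt]
  simp only [if_pos (by omega : (0:Int) < n)]
  rw [dfsB_eq n l _ cp [] (fun j => PySem.Set.mem_ofList cp j) (by simpa using hn)]
  simp

theorem alt_neg (l : List (List Int)) (n : Int) (cp : List Int) (hn : n ≤ 0) :
    rec_perm_py_alt l n cp = [] := by
  rw [rec_perm_py_alt]
  simp only [if_neg (by omega : ¬ (0:Int) < n)]
  rw [if_neg (by omega : ¬ (0:Int) < (0:Int))]

-- ===== VERDICT (by name: the statement is the Claim_ definition above) =====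
theorem rec_perm_py_spec : Claim_unchanged_rec_perm_py := by
  intro l n cp _ hnd
  by_cases hn : 1 ≤ n
  · rw [recA_pos l n cp hn, alt_pos l n cp hn]
  · have hn0 : n ≤ 0 := by omega
    have hg : pvGreedy l cp = none := by
      cases h : pvGreedy l cp with
      | none => rfl
      | some p => exact absurd ⟨hn0, by simp [h]⟩ hnd
    rw [recA_neg l n cp hn0, alt_neg l n cp hn0, hg]

theorem rec_perm_py_changed : Claim_changed_rec_perm_py := by
  unfold Claim_changed_rec_perm_py; decide

theorem rec_perm_py_tight : Claim_exact_rec_perm_py := by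
  intro l n cp _ hd
  obtain ⟨hn, hg⟩ := hd
  rw [recA_neg l n cp hn, alt_neg l n cp hn]
  cases hgg : pvGreedy l cp with
  | none => rw [hgg] at hg; simp at hg
  | some p => simp
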